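-- pv_equiv track=rewrite | github.com/Minghao23/TexasHoldem | src/hand_value.py | find_two_pairs
-- ===== SOURCE A (Python) =====
-- def find_two_pairs(sorted_cards):
--     result = []
--     # 1. find largest 2 of a kind
--     start = 0
--     end = 1
--     while end < len(sorted_cards):
--         if sorted_cards[end] == sorted_cards[start]:
--             end += 1
--         else:
--             start = end
--             end = start + 1
--         if end - start == 2:
--             result.extend(sorted_cards[start: end])
--             break
--     if len(result) != 2:
--         return None
--
--     # 2. find another largest 2 of a kind from remaining part
--     remain = sorted_cards[: start] + sorted_cards[end:]
--     start = 0
--     end = 1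
--     while end < len(remain):
--         if remain[end] == remain[start]:
--             end += 1
--         else:
--             start = end
--             end = start + 1
--         if end - start == 2:
--             result.extend(remain[start: end])
--             break
--     if len(result) != 4:
--         return None
--
--     # 3. complement with the largest card in the rest
--     remain = remain[: start] + remain[end:]
--     result.append(remain[0])
--     return result
-- ===== SOURCE B (Python) =====
-- def _runs(cards):
--     # consecutive runs (value, count), left to right, one pass
--     if not cards:
--         return []
--     runs = []
--     v, n = cards[0], 1
--     for c in cards[1:]:
--         if c == v:
--             n += 1
--         else:
--             runs.append((v, n))
--             v, n = c, 1
--     runs.append((v, n))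
--     return runs
--
-- def _normalize(runs):
--     # drop zero-count runs and merge adjacent runs of equal value
--     out = []
--     for v, n in runs:
--         if n == 0:
--             continue
--         if out and out[-1][0] == v:
--             out[-1] = (v, out[-1][1] + n)
--         else:
--             out.append((v, n))
--     return out
--
-- def _take_pair(runs):
--     # remove two cards of the first run with count >= 2
--     for k, (v, n) in enumerate(runs):
--         if n >= 2:
--             return v, runs[:k] + [(v, n - 2)] + runs[k + 1:]
--     return None
--
-- def find_two_pairs(sorted_cards):
--     r = _take_pair(_runs(sorted_cards))
--     if r is None:
--         return None
--     a, rs = r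
--     r = _take_pair(_normalize(rs))
--     if r is None:
--         return None
--     b, rs = r
--     rs = _normalize(rs)
--     if not rs:
--         return None
--     return [a, a, b, b, rs[0][0]]
-- ===== Notes on version B (the rewrite author's own statement) =====
-- stated objective: alternative
-- what changed: A scans the flat card list twice with start/end index pointers and list slicing; B builds a run-length list (value, count) in one pass, picks each pair by decrementing the first run with count >= 2 (renormalizing so leftover copies can merge or re-pair, reproducing the full-house/quads behaviour), and reads the kicker off the first remaining run.
-- outside the precondition, e.g. on find_two_pairs([1, 1, 2, 2]): A raises IndexError, B returns None
import Mathlib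
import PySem

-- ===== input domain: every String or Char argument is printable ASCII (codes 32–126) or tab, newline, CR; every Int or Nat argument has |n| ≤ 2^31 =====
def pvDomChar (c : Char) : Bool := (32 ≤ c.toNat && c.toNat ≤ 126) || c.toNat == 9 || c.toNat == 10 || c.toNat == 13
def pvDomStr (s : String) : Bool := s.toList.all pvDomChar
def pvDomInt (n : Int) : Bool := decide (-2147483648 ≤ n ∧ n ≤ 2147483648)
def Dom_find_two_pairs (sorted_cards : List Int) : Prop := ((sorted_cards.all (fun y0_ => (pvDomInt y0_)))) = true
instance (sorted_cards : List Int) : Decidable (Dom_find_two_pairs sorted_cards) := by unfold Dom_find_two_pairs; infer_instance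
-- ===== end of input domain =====

-- B replaces A's two index-pointer while-loops over the flat card list by a run-length
-- list (value, count): extract a pair by decrementing the first run with count ≥ 2,
-- renormalize, repeat, and read the kicker off the first remaining run (objective:
-- alternative decomposition, same cost).

-- ===== PORT A =====
-- A's while loop: state (start, end); returns the break value of 'start' (the index of
-- the first adjacent equal pair) or none when the loop falls through.  All list reads
-- are at indices < length, so List.getD is exact for Python's indexing here.
def pvALoop (cards : List Int) (start e : Nat) : Option Nat :=
  if e < cards.length then
    if cards.getD e 0 = cards.getD start 0 then
      if e + 1 - start = 2 then some start else pvALoop cards start (e + 1)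
    else
      if e + 1 - e = 2 then some e else pvALoop cards e (e + 1)
  else none
termination_by cards.length - e

-- Slices with in-range Nat bounds: xs[a:b] = (xs.drop a).take (b-a), xs[:a] = take, xs[b:] = drop (exact here).
-- Python A raises IndexError at 'remain[0]' when that list is empty (excluded by Pre_); the port returns none there.
def find_two_pairs (sorted_cards : List Int) : Option (List Int) :=
  match pvALoop sorted_cards 0 1 with
  | none => none
  | some start =>
    let result := (sorted_cards.drop start).take 2
    let remain := sorted_cards.take start ++ sorted_cards.drop (start + 2)
    match pvALoop remain 0 1 with
    | none => none
    | some s2 =>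
      let result2 := result ++ (remain.drop s2).take 2
      let remain2 := remain.take s2 ++ remain.drop (s2 + 2)
      match PySem.List.pyGet? remain2 0 with
      | none => none
      | some k => some (result2 ++ [k])

-- ===== PORT B =====
-- B's _runs loop: current run (v, n) plus the rest of the scan
def pvRunsAux (v : Int) (n : Nat) : List Int → List (Int × Nat)
  | [] => [(v, n)]
  | c :: rest => if c = v then pvRunsAux v (n + 1) rest else (v, n) :: pvRunsAux c 1 rest

-- consecutive runs (value, count), left to right (B's _runs)
def pvRuns : List Int → List (Int × Nat)
  | [] => []
  | v :: rest => pvRunsAux v 1 rest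

-- drop zero-count runs and merge adjacent runs of equal value (B's _normalize)
def pvNormalize : List (Int × Nat) → List (Int × Nat)
  | [] => []
  | (v, n) :: rest =>
    if n = 0 then pvNormalize rest
    else
      match pvNormalize rest with
      | (w, m) :: t => if w = v then (v, n + m) :: t else (v, n) :: (w, m) :: t
      | [] => [(v, n)]

-- remove two cards of the first run with count ≥ 2 (B's _take_pair)
def pvTakePair : List (Int × Nat) → Option (Int × List (Int × Nat))
  | [] => none
  | (v, n) :: rest =>
    if 2 ≤ n then some (v, (v, n - 2) :: rest)
    else (pvTakePair rest).map (fun p => (p.1, (v, n) :: p.2))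

def find_two_pairs_alt (sorted_cards : List Int) : Option (List Int) :=
  match pvTakePair (pvRuns sorted_cards) with
  | none => none
  | some (a, rs) =>
    match pvTakePair (pvNormalize rs) with
    | none => none
    | some (b, rs2) =>
      match pvNormalize rs2 with
      | [] => none
      | (k, _) :: _ => some [a, a, b, b, k]

-- ===== PRECONDITION & SPEC =====
-- Pre_ excludes exactly the inputs on which Python A raises IndexError at 'remain[0]':
-- length-4 lists made of two adjacent-arranged pairs, where both pair extractions
-- consume all four cards and no kicker remains.
def Pre_find_two_pairs (sorted_cards : List Int) : Prop :=
  ¬ (sorted_cards.length = 4 ∧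
     ((sorted_cards.getD 0 0 = sorted_cards.getD 1 0 ∧ sorted_cards.getD 2 0 = sorted_cards.getD 3 0) ∨
      (sorted_cards.getD 1 0 = sorted_cards.getD 2 0 ∧ sorted_cards.getD 0 0 = sorted_cards.getD 3 0)))
instance (sorted_cards : List Int) : Decidable (Pre_find_two_pairs sorted_cards) := by
  unfold Pre_find_two_pairs; infer_instance

def pvWitness_find_two_pairs : List Int := [3, 3, 2, 2, 5]

def Spec_find_two_pairs (sorted_cards : List Int) (out : Option (List Int)) : Prop :=
  out = find_two_pairs_alt sorted_cards
instance (sorted_cards : List Int) (out : Option (List Int)) : Decidable (Spec_find_two_pairs sorted_cards out) := by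
  unfold Spec_find_two_pairs; infer_instance

-- ===== CLAIM =====
def Claim_equal_find_two_pairs : Prop := ∀ (sorted_cards : List Int), Dom_find_two_pairs sorted_cards → Pre_find_two_pairs sorted_cards → Spec_find_two_pairs sorted_cards (find_two_pairs sorted_cards)


-- ===== LEMMAS AND PROOFS =====

-- The common specification: recursively extract the first adjacent equal pair,
-- returning its value and the list with those two cards removed.
def extractPair : List Int → Option (Int × List Int)
  | a :: b :: rest =>
    if b = a then some (a, rest)
    else (extractPair (b :: rest)).map (fun p => (p.1, a :: p.2))
  | _ => none

def flattenRuns : List (Int × Nat) → List Int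
  | [] => []
  | (v, n) :: rs => List.replicate n v ++ flattenRuns rs

-- well-formed run lists: positive counts, adjacent values distinct
def InvR : List (Int × Nat) → Prop
  | [] => True
  | [(_, n)] => 0 < n
  | (v, n) :: (w, m) :: rest => 0 < n ∧ v ≠ w ∧ InvR ((w, m) :: rest)

theorem flatten_pvRunsAux (l : List Int) : ∀ (v : Int) (n : Nat),
    flattenRuns (pvRunsAux v n l) = List.replicate n v ++ l := by
  induction l with
  | nil => intro v n; simp [pvRunsAux, flattenRuns]
  | cons c r ih =>
    intro v n
    by_cases hc : c = v
    · subst hc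
      rw [pvRunsAux, if_pos rfl, ih, List.replicate_succ']
      simp
    · rw [pvRunsAux, if_neg hc, flattenRuns, ih]
      simp

theorem flatten_pvRuns (l : List Int) : flattenRuns (pvRuns l) = l := by
  cases l with
  | nil => simp [pvRuns, flattenRuns]
  | cons v rest => rw [pvRuns, flatten_pvRunsAux]; simp

theorem pvRunsAux_head (l : List Int) : ∀ (v : Int) (n : Nat),
    ∃ m t, pvRunsAux v n l = (v, m) :: t := by
  induction l with
  | nil => intro v n; exact ⟨n, [], rfl⟩
  | cons c r ih =>
    intro v n
    by_cases hc : c = v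
    · subst hc
      rw [pvRunsAux, if_pos rfl]
      exact ih c (n + 1)
    · exact ⟨n, pvRunsAux c 1 r, by rw [pvRunsAux, if_neg hc]⟩

theorem invR_pvRunsAux (l : List Int) : ∀ (v : Int) (n : Nat), 0 < n →
    InvR (pvRunsAux v n l) := by
  induction l with
  | nil => intro v n hn; exact hn
  | cons c r ih =>
    intro v n hn
    by_cases hc : c = v
    · subst hc
      rw [pvRunsAux, if_pos rfl]
      exact ih c (n + 1) (by omega)
    · rw [pvRunsAux, if_neg hc]
      obtain ⟨m, t, he⟩ := pvRunsAux_head r c 1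
      rw [he]
      exact ⟨hn, fun hv => hc hv.symm, he ▸ ih c 1 (by omega)⟩

theorem invR_pvRuns (l : List Int) : InvR (pvRuns l) := by
  cases l with
  | nil => simp [pvRuns, InvR]
  | cons v rest => exact invR_pvRunsAux rest v 1 (by omega)

theorem invR_tail {v : Int} {n : Nat} {rest : List (Int × Nat)}
    (h : InvR ((v, n) :: rest)) : InvR rest ∧ 0 < n := by
  cases rest with
  | nil => exact ⟨trivial, h⟩
  | cons q t => obtain ⟨q1, q2⟩ := q; exact ⟨h.2.2, h.1⟩

-- extracting the first pair on runs matches extracting it on the flat list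
theorem main_extract (rs : List (Int × Nat)) (hinv : InvR rs) :
    extractPair (flattenRuns rs) = (pvTakePair rs).map (fun p => (p.1, flattenRuns p.2)) := by
  induction rs with
  | nil => simp [flattenRuns, extractPair, pvTakePair]
  | cons p rest ih =>
    obtain ⟨v, n⟩ := p
    obtain ⟨hrest, hn⟩ := invR_tail hinv
    by_cases h2 : 2 ≤ n
    · obtain ⟨k, rfl⟩ : ∃ k, n = 2 + k := ⟨n - 2, by omega⟩
      simp [flattenRuns, List.replicate_succ, pvTakePair, extractPair, Nat.add_comm 2 k]
    · obtain rfl : n = 1 := by omega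
      cases rest with
      | nil => simp [flattenRuns, extractPair, pvTakePair]
      | cons q t =>
        obtain ⟨w, m⟩ := q
        have hvw : v ≠ w := hinv.2.1
        have hm : 0 < m := (invR_tail hrest).2
        obtain ⟨m', rfl⟩ : ∃ m', m = m' + 1 := ⟨m - 1, by omega⟩
        have hflat : flattenRuns ((w, m' + 1) :: t) = w :: (List.replicate m' w ++ flattenRuns t) := by
          simp [flattenRuns, List.replicate_succ]
        have hstep : pvTakePair ((v, 1) :: (w, m' + 1) :: t)
            = (pvTakePair ((w, m' + 1) :: t)).map (fun p => (p.1, (v, 1) :: p.2)) := by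
          rw [pvTakePair]; simp
        rw [flattenRuns]
        simp only [List.replicate_one, List.singleton_append]
        rw [hflat, extractPair]
        simp only [if_neg (fun h : w = v => hvw h.symm)]
        rw [← hflat, ih hrest, hstep]
        cases pvTakePair ((w, m' + 1) :: t) with
        | none => simp
        | some p =>
          simp [flattenRuns, List.replicate_one]

theorem flatten_normalize (rs : List (Int × Nat)) :
    flattenRuns (pvNormalize rs) = flattenRuns rs := by
  induction rs with
  | nil => simp [pvNormalize]
  | cons p rest ih =>
    obtain ⟨v, n⟩ := p
    rw [pvNormalize]
    by_cases h0 : n = 0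
    · simp [h0, ih, flattenRuns]
    · simp only [if_neg h0]
      cases hr : pvNormalize rest with
      | nil =>
        rw [hr] at ih
        simp [flattenRuns, ← ih]
      | cons q t =>
        obtain ⟨w, m⟩ := q
        rw [hr] at ih
        simp only [flattenRuns] at ih
        dsimp only
        by_cases hw : w = v
        · subst hw
          rw [if_pos rfl]
          simp only [flattenRuns, List.replicate_add, List.append_assoc, ih]
        · simp only [if_neg hw, flattenRuns, ih]

theorem invR_normalize (rs : List (Int × Nat)) : InvR (pvNormalize rs) := by
  induction rs with
  | nil => simp [pvNormalize, InvR]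
  | cons p rest ih =>
    obtain ⟨v, n⟩ := p
    rw [pvNormalize]
    by_cases h0 : n = 0
    · simpa [h0] using ih
    · simp only [if_neg h0]
      cases hr : pvNormalize rest with
      | nil => exact Nat.pos_of_ne_zero h0
      | cons q t =>
        obtain ⟨w, m⟩ := q
        rw [hr] at ih
        dsimp only
        by_cases hw : w = v
        · subst hw
          rw [if_pos rfl]
          cases t with
          | nil => simp only [InvR]; have := Nat.pos_of_ne_zero h0; omega
          | cons u t' =>
            obtain ⟨u1, u2⟩ := u
            exact ⟨by omega, ih.2.1, ih.2.2⟩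
        · rw [if_neg hw]
          exact ⟨Nat.pos_of_ne_zero h0, fun he => hw he.symm, ih⟩

-- behaviour of A's loop started at (s, s+1): one unfolded step
theorem pvALoop_char (cards : List Int) (s : Nat) :
    pvALoop cards s (s + 1) =
      if s + 1 < cards.length then
        (if cards.getD (s + 1) 0 = cards.getD s 0 then some s else pvALoop cards (s + 1) (s + 2))
      else none := by
  rw [pvALoop]
  by_cases h : s + 1 < cards.length
  · rw [if_pos h, if_pos h]
    by_cases he : cards.getD (s + 1) 0 = cards.getD s 0
    · rw [if_pos he, if_pos he, if_pos (by omega)]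
    · rw [if_neg he, if_neg he, if_neg (by omega)]
  · rw [if_neg h, if_neg h]

theorem pvALoop_shift (cards : List Int) (x : Int) (s : Nat) :
    pvALoop (x :: cards) (s + 1) (s + 2) = (pvALoop cards s (s + 1)).map (· + 1) := by
  have hterm : ∀ k s, cards.length - s ≤ k →
      pvALoop (x :: cards) (s + 1) (s + 2) = (pvALoop cards s (s + 1)).map (· + 1) := by
    intro k
    induction k with
    | zero =>
      intro s hs
      conv_lhs => rw [show s + 2 = (s + 1) + 1 from rfl, pvALoop_char]
      conv_rhs => rw [pvALoop_char]
      rw [if_neg (by simp only [List.length_cons]; omega), if_neg (by omega)]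
      simp
    | succ k ih =>
      intro s hs
      conv_lhs => rw [show s + 2 = (s + 1) + 1 from rfl, pvALoop_char]
      conv_rhs => rw [pvALoop_char]
      simp only [List.length_cons, List.getD_cons_succ]
      by_cases h : s + 1 < cards.length
      · rw [if_pos (by omega), if_pos h]
        split
        · next he => rfl
        · next he => exact ih (s + 1) (by omega)
      · rw [if_neg (by omega), if_neg h]; simp
  exact hterm (cards.length) s (by omega)

theorem pvALoop_nil : pvALoop [] 0 1 = none := by rw [pvALoop]; simp
theorem pvALoop_single (a : Int) : pvALoop [a] 0 1 = none := by rw [pvALoop]; simp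

theorem pvALoop_cons (a b : Int) (rest : List Int) :
    pvALoop (a :: b :: rest) 0 1 =
      if b = a then some 0 else (pvALoop (b :: rest) 0 1).map (· + 1) := by
  rw [show (1 : Nat) = 0 + 1 from rfl, pvALoop_char]
  simp only [List.length_cons, List.getD_cons_succ, List.getD_cons_zero]
  rw [if_pos (by omega)]
  by_cases he : b = a
  · simp [he]
  · rw [if_neg he, if_neg he]
    exact pvALoop_shift (b :: rest) a 0

-- A's index loop + slicing computes exactly extractPair
theorem A_extract (cards : List Int) :
    match extractPair cards with
    | none => pvALoop cards 0 1 = none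
    | some p => ∃ s, pvALoop cards 0 1 = some s ∧
        (cards.drop s).take 2 = [p.1, p.1] ∧
        cards.take s ++ cards.drop (s + 2) = p.2 := by
  induction cards using extractPair.induct with
  | case3 t h =>
    cases t with
    | nil => simpa [extractPair] using pvALoop_nil
    | cons a t' =>
      cases t' with
      | nil => simpa [extractPair] using pvALoop_single a
      | cons b rest => exact (h a b rest rfl).elim
  | case1 b rest =>
    simp only [extractPair]
    refine ⟨0, ?_, ?_, ?_⟩
    · rw [pvALoop_cons]; simp
    · simp
    · simp
  | case2 a b rest hab ih =>
    simp only [extractPair, if_neg hab]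
    cases hx : extractPair (b :: rest) with
    | none =>
      rw [hx] at ih
      simp [pvALoop_cons, hab, ih]
    | some p =>
      rw [hx] at ih
      obtain ⟨s, hloop, htake, hrem⟩ := ih
      refine ⟨s + 1, ?_, ?_, ?_⟩
      · rw [pvALoop_cons, if_neg hab, hloop]; rfl
      · simpa using htake
      · rw [show s + 2 = (s + 1) + 1 from rfl, List.drop_succ_cons] at hrem
        simp only [List.take_succ_cons, List.cons_append]
        rw [show s + 1 + 2 = (s + 2) + 1 from rfl, List.drop_succ_cons,
            show s + 2 = (s + 1) + 1 from rfl, List.drop_succ_cons, ← hrem]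

theorem ports_agree (cards : List Int) : find_two_pairs cards = find_two_pairs_alt cards := by
  have h1 : extractPair cards = (pvTakePair (pvRuns cards)).map (fun p => (p.1, flattenRuns p.2)) := by
    conv_lhs => rw [← flatten_pvRuns cards]
    exact main_extract _ (invR_pvRuns cards)
  have hA := A_extract cards
  rw [find_two_pairs, find_two_pairs_alt]
  cases htp : pvTakePair (pvRuns cards) with
  | none =>
    rw [htp, Option.map_none] at h1
    rw [h1] at hA
    simp only at hA
    rw [hA]
  | some p =>
    obtain ⟨a, rs⟩ := p
    rw [htp, Option.map_some] at h1
    dsimp only at h1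
    rw [h1] at hA
    obtain ⟨s, hloop, htake, hrem⟩ := hA
    rw [hloop]
    simp only [htake, hrem]
    -- second round on remain = flattenRuns rs
    have h2 : extractPair (flattenRuns rs) =
        (pvTakePair (pvNormalize rs)).map (fun p => (p.1, flattenRuns p.2)) := by
      conv_lhs => rw [← flatten_normalize rs]
      exact main_extract _ (invR_normalize rs)
    have hB := A_extract (flattenRuns rs)
    cases htp2 : pvTakePair (pvNormalize rs) with
    | none =>
      rw [htp2, Option.map_none] at h2
      rw [h2] at hB
      simp only at hB
      rw [hB]
    | some q =>
      obtain ⟨b, rs2⟩ := q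
      rw [htp2, Option.map_some] at h2
      dsimp only at h2
      rw [h2] at hB
      obtain ⟨t, hloop2, htake2, hrem2⟩ := hB
      rw [hloop2]
      simp only [htake2, hrem2]
      cases hnorm : pvNormalize rs2 with
      | nil =>
        have hfl : flattenRuns rs2 = [] := by
          rw [← flatten_normalize rs2, hnorm, flattenRuns]
        rw [hfl]
        simp [PySem.List.pyGet?]
      | cons r t' =>
        obtain ⟨k, j⟩ := r
        have hj : 0 < j := (invR_tail (hnorm ▸ invR_normalize rs2)).2
        have hfl : flattenRuns rs2 = List.replicate j k ++ flattenRuns t' := by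
          rw [← flatten_normalize rs2, hnorm, flattenRuns]
        obtain ⟨j', rfl⟩ : ∃ j', j = j' + 1 := ⟨j - 1, by omega⟩
        rw [hfl]
        simp only [List.replicate_succ, List.cons_append]
        rw [PySem.List.pyGet?_zero_cons]
        simp

-- ===== VERDICT =====
theorem find_two_pairs_spec : Claim_equal_find_two_pairs := by
  intro cards _ _
  exact ports_agree cards
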